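-- pv_equiv track=rewrite | github.com/netra-systems/zen | test_framework/archive_old_large_modules/failure_analysis.py | _identify_flaky_tests
-- ===== SOURCE A (Python) =====
-- from typing import Dict, List, Any
-- from collections import defaultdict
--
-- def _identify_flaky_tests(test_results: List[Dict]) -> List[str]:
--     """Identify tests with inconsistent results"""
--     test_results_by_name = defaultdict(list)
--     for result in test_results:
--         test_results_by_name[result.get("name", "")].append(result.get("status"))
--
--     flaky_tests = []
--     for test_name, statuses in test_results_by_name.items():
--         if len(set(statuses)) > 1:  # Mixed results
--             flaky_tests.append(test_name)
--
--     return flaky_tests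
-- ===== SOURCE B (Python) =====
-- def _identify_flaky_tests(test_results):
--     """Identify tests with inconsistent results (single pass, no grouping)."""
--     first_status = {}
--     order = []
--     flaky = set()
--     for result in test_results:
--         name = result.get("name", "")
--         status = result.get("status")
--         if name not in first_status:
--             first_status[name] = status
--             order.append(name)
--         elif status != first_status[name]:
--             flaky.add(name)
--     return [name for name in order if name in flaky]
-- ===== Notes on version B (the rewrite author's own statement) =====
-- stated objective: simpler
-- what changed: Instead of grouping all statuses per name into a defaultdict of lists and then counting distinct statuses per group, B does a single pass keeping only each name's first status, the first-occurrence order, and a set of names already seen with a differing status.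
import Mathlib
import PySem

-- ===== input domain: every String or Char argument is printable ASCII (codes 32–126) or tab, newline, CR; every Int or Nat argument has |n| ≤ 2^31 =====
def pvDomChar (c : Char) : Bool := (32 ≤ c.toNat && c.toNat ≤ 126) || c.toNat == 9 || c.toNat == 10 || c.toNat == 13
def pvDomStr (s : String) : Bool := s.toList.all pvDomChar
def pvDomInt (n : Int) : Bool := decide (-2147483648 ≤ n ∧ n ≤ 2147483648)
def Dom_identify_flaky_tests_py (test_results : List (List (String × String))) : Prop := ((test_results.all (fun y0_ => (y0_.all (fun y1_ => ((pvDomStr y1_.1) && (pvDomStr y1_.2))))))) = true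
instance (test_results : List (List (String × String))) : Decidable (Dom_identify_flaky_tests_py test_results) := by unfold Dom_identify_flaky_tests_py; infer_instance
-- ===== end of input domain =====

-- B replaces A's "group every status per name into per-name lists, then count distinct statuses"
-- by a single pass keeping only each name's first status, the first-occurrence order, and the
-- set of names already seen with a differing status (objective: simpler — less state kept).

-- ===== PORT A =====
-- result.get("name", "") / result.get("status")  (result is a dict: first-match lookup)
def pvName (result : List (String × String)) : String :=
  (PySem.Dict.mk result).getD "name" ""
def pvStatus (result : List (String × String)) : Option String :=
  (PySem.Dict.mk result).get? "status"

-- test_results_by_name[result.get("name", "")].append(result.get("status"))  (defaultdict(list))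
def pvStepA (d : PySem.Dict String (List (Option String))) (result : List (String × String)) :
    PySem.Dict String (List (Option String)) :=
  d.modify (pvName result) [] (fun l => l ++ [pvStatus result])

def identify_flaky_tests_py (test_results : List (List (String × String))) : List String :=
  let test_results_by_name := test_results.foldl pvStepA PySem.Dict.empty
  test_results_by_name.items.foldl
    (fun flaky_tests p =>
      if 1 < (PySem.Set.ofList p.2).length then flaky_tests ++ [p.1] else flaky_tests) []

-- ===== PORT B =====
-- one step of B's single pass over the state (first_status, order, flaky)
def pvStepB (st : PySem.Dict String (Option String) × List String × PySem.Set String)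
    (result : List (String × String)) :
    PySem.Dict String (Option String) × List String × PySem.Set String :=
  let name := pvName result
  let status := pvStatus result
  if st.1.contains name then
    if status ≠ st.1.getD name none then (st.1, st.2.1, st.2.2.add name) else st
  else
    (st.1.insert name status, st.2.1 ++ [name], st.2.2)

def identify_flaky_tests_py_alt (test_results : List (List (String × String))) : List String :=
  let st := test_results.foldl pvStepB (PySem.Dict.empty, [], PySem.Set.empty)
  st.2.1.filter (fun name => st.2.2.contains name)

-- ===== PRECONDITION & SPEC =====
def Spec_identify_flaky_tests_py (test_results : List (List (String × String))) (out : List String) : Prop := out = identify_flaky_tests_py_alt test_results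
instance (test_results : List (List (String × String))) (out : List String) : Decidable (Spec_identify_flaky_tests_py test_results out) := by unfold Spec_identify_flaky_tests_py; infer_instance

-- ===== CLAIM (what is proved, stated in full; the proofs are below) =====
def Claim_equal_identify_flaky_tests_py : Prop := ∀ (test_results : List (List (String × String))), Dom_identify_flaky_tests_py test_results → Spec_identify_flaky_tests_py test_results (identify_flaky_tests_py test_results)

-- ===== LEMMAS AND PROOFS =====

-- Coupling invariant between A's grouped dict and B's (first_status, order, flaky) state:
-- order is the dict's (nodup) key list; first_status holds exactly the grouped names, mapping
-- each to the head of its status list; flaky holds exactly the names whose status list contains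
-- an element different from its head.
def pvInv (d : PySem.Dict String (List (Option String)))
    (st : PySem.Dict String (Option String) × List String × PySem.Set String) : Prop :=
  st.2.1 = d.keys ∧ d.keys.Nodup ∧
  (∀ n, st.1.contains n = d.contains n) ∧
  (∀ n, d.contains n = true → (d.getD n []).head? = some (st.1.getD n none)) ∧
  (∀ n, st.2.2.contains n = true ↔
    d.contains n = true ∧ ∃ x ∈ (d.getD n []).tail, some x ≠ (d.getD n []).head?)

lemma pvInv_empty : pvInv PySem.Dict.empty (PySem.Dict.empty, [], PySem.Set.empty) := by
  refine ⟨rfl, by simp [PySem.Dict.keys, PySem.Dict.empty], fun n => rfl, ?_, ?_⟩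
  · intro n hc
    rw [PySem.Dict.contains_empty] at hc
    exact absurd hc (by simp)
  · intro n
    simp [PySem.Set.empty, PySem.Set.contains_iff, PySem.Dict.contains_empty]

lemma pvInv_step (d : PySem.Dict String (List (Option String)))
    (st : PySem.Dict String (Option String) × List String × PySem.Set String)
    (r : List (String × String)) (h : pvInv d st) : pvInv (pvStepA d r) (pvStepB st r) := by
  obtain ⟨h1, h2, h3, h4, h5⟩ := h
  obtain ⟨first, order, flaky⟩ := st
  simp only [pvInv] at *
  unfold pvStepA pvStepB
  generalize pvName r = name
  generalize pvStatus r = status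
  have hgd := fun n => PySem.Dict.getD_modify d name n [] (fun l => l ++ [status])
  have hcd := fun n => PySem.Dict.contains_modify d name n [] (fun l => l ++ [status])
  by_cases hcn : d.contains name = true
  · -- name already grouped: keys unchanged
    have hcf : first.contains name = true := by rw [h3]; exact hcn
    have hkeys : (d.modify name [] (fun l => l ++ [status])).keys = d.keys := by
      rw [PySem.Dict.keys_modify, PySem.Dict.keys_insert_of_contains _ _ hcn]
    have hh := h4 name hcn
    rcases hl : d.getD name [] with _ | ⟨s0, rest⟩
    · rw [hl] at hh; simp at hh
    · rw [hl] at hh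
      simp only [List.head?_cons, Option.some.injEq] at hh
      rw [if_pos hcf]
      by_cases hne : status ≠ first.getD name none
      · rw [if_pos hne]
        refine ⟨by simpa [hkeys] using h1, by simpa [hkeys] using h2, ?_, ?_, ?_⟩
        · intro n; rw [hcd n, h3 n]
          by_cases hn : n = name <;> simp [hn, hcn]
        · intro n hcn'
          rw [hgd n]
          by_cases hn : n = name
          · subst hn; simp [hl, hh]
          · simp only [if_neg hn]
            exact h4 n (by rw [hcd n] at hcn'; simpa [hn] using hcn')
        · intro n
          rw [hgd n, hcd n]
          by_cases hn : n = name
          · subst hn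
            simp only [eq_self_iff_true, if_true, hl, BEq.rfl, Bool.true_or, true_and, List.cons_append, List.head?_cons, List.tail_cons]
            constructor
            · intro _
              refine ⟨status, by simp, ?_⟩
              simp only [List.cons_append, List.head?_cons, ne_eq, Option.some.injEq]
              rw [hh]; exact fun hc => hne hc
            · intro _
              rw [PySem.Set.contains_iff, PySem.Set.mem_add]
              exact Or.inr rfl
          · simp only [if_neg hn, (by simp [hn] : (n == name) = false), Bool.false_or]
            rw [← h5 n, Bool.eq_iff_iff, PySem.Set.contains_iff, PySem.Set.contains_iff,
              PySem.Set.mem_add]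
            simp [hn]
      · rw [if_neg hne]
        push Not at hne
        refine ⟨by simpa [hkeys] using h1, by simpa [hkeys] using h2, ?_, ?_, ?_⟩
        · intro n; rw [hcd n, h3 n]
          by_cases hn : n = name <;> simp [hn, hcn]
        · intro n hcn'
          rw [hgd n]
          by_cases hn : n = name
          · subst hn; simp [hl, hh]
          · simp only [if_neg hn]
            exact h4 n (by rw [hcd n] at hcn'; simpa [hn] using hcn')
        · intro n
          rw [hgd n, hcd n]
          by_cases hn : n = name
          · subst hn
            simp only [eq_self_iff_true, if_true, hl, BEq.rfl, Bool.true_or, true_and, List.cons_append, List.head?_cons, List.tail_cons]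
            rw [h5 n, hl]
            simp only [hcn, true_and, List.tail_cons, List.cons_append,
              List.head?_cons]
            constructor
            · rintro ⟨x, hx, hxs⟩; exact ⟨x, by simp [hx], hxs⟩
            · rintro ⟨x, hx, hxs⟩
              rcases List.mem_append.mp hx with hx' | hx'
              · exact ⟨x, hx', hxs⟩
              · exfalso; apply hxs
                simp only [List.mem_singleton] at hx'
                rw [hx', hne, hh]
          · simp only [if_neg hn, (by simp [hn] : (n == name) = false), Bool.false_or]
            exact h5 n
  · -- new name: appended to keys/order
    have hcf : first.contains name = false := by rw [h3]; simpa using hcn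
    have hnil : d.getD name [] = [] := PySem.Dict.getD_of_not_contains d [] (by simpa using hcn)
    have hkeys : (d.modify name [] (fun l => l ++ [status])).keys = d.keys ++ [name] := by
      rw [PySem.Dict.keys_modify, PySem.Dict.keys_insert_of_not_contains _ _ (by simpa using hcn)]
    have hnm : name ∉ d.keys := fun hm =>
      hcn ((PySem.Dict.contains_iff_mem_keys d name).mpr hm)
    rw [if_neg (by simp [hcf])]
    refine ⟨by rw [hkeys, h1],
      by rw [hkeys]; exact List.Nodup.append h2 (by simp) (by simpa using hnm), ?_, ?_, ?_⟩
    · intro n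
      rw [hcd n, PySem.Dict.contains_insert, h3 n]
    · intro n hcn0
      rw [hgd n, PySem.Dict.getD_insert]
      by_cases hn : n = name
      · subst hn; simp [hnil]
      · simp only [if_neg hn]
        have hcn1 : d.contains n = true := by
          rw [hcd n] at hcn0; simpa [hn] using hcn0
        exact h4 n hcn1
    · intro n
      rw [hgd n, hcd n]
      by_cases hn : n = name
      · subst hn
        simp only [eq_self_iff_true, if_true, hnil, BEq.rfl, Bool.true_or, true_and]
        rw [h5 n, hnil]
        simp [hcn]
      · simp only [if_neg hn, (by simp [hn] : (n == name) = false), Bool.false_or]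
        exact h5 n

lemma pvInv_foldl (l : List (List (String × String)))
    (d : PySem.Dict String (List (Option String)))
    (st : PySem.Dict String (Option String) × List String × PySem.Set String)
    (h : pvInv d st) : pvInv (l.foldl pvStepA d) (l.foldl pvStepB st) := by
  induction l generalizing d st with
  | nil => exact h
  | cons r l ih => exact ih _ _ (pvInv_step d st r h)

-- set(statuses) has more than one element iff some later status differs from the first
lemma pvSet_one_lt (a : Option String) (l : List (Option String)) :
    (1 < (PySem.Set.ofList (a :: l)).length) ↔ ∃ x ∈ l, x ≠ a := by
  rw [PySem.Set.ofList_cons]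
  constructor
  · intro h
    by_contra hc
    push Not at hc
    have : (PySem.Set.ofList l).discard a = [] := by
      rw [List.eq_nil_iff_forall_not_mem]
      intro y hy
      rw [PySem.Set.mem_discard] at hy
      exact hy.2 (hc y ((PySem.Set.mem_ofList l y).mp hy.1))
    simp [this] at h
  · rintro ⟨x, hx, hxa⟩
    have hm : x ∈ (PySem.Set.ofList l).discard a := by
      rw [PySem.Set.mem_discard, PySem.Set.mem_ofList]; exact ⟨hx, hxa⟩
    have := List.length_pos_of_mem hm
    simp only [List.length_cons]
    omega

-- given the invariant, A's final flaky list equals B's order-filter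
lemma pvFinal (d : PySem.Dict String (List (Option String)))
    (st : PySem.Dict String (Option String) × List String × PySem.Set String)
    (h : pvInv d st) :
    d.items.foldl
      (fun acc p => if 1 < (PySem.Set.ofList p.2).length then acc ++ [p.1] else acc) []
      = st.2.1.filter (fun name => st.2.2.contains name) := by
  obtain ⟨h1, h2, h3, h4, h5⟩ := h
  have hA := PySem.List.foldl_append_if
    (fun p : String × List (Option String) => decide (1 < (PySem.Set.ofList p.2).length))
    Prod.fst d.items []
  simp only [decide_eq_true_eq, List.nil_append] at hA
  rw [hA, PySem.Dict.items_eq_map_keys d h2 [], List.filter_map, List.map_map, h1]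
  simp only [Function.comp_def, List.map_id']
  apply List.filter_congr
  intro k hk
  have hc : d.contains k = true := (PySem.Dict.contains_iff_mem_keys d k).mpr hk
  have hh := h4 k hc
  rcases hl : d.getD k [] with _ | ⟨s0, rest⟩
  · rw [hl] at hh; simp at hh
  · rw [hl] at hh
    simp only [List.head?_cons, Option.some.injEq] at hh
    have : (1 < (PySem.Set.ofList (s0 :: rest)).length) ↔ (st.2.2.contains k = true) := by
      rw [pvSet_one_lt, h5 k, hl]
      simp [hc, hh]
    rw [Bool.eq_iff_iff]
    simpa using this

-- ===== VERDICT (by name: the statement is the Claim_ definition above) =====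
theorem identify_flaky_tests_py_spec : Claim_equal_identify_flaky_tests_py := by
  intro tr _
  show identify_flaky_tests_py tr = identify_flaky_tests_py_alt tr
  exact pvFinal _ _ (pvInv_foldl tr _ _ pvInv_empty)
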